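-- pv_equiv track=rewrite | github.com/tennyson-mccalla/SuperNavigator | navigator-main/skills/nav-onboard/functions/skill_recommender.py | _generate_quick_start_curriculum
-- ===== SOURCE A (Python) =====
-- from typing import Dict, List
--
-- def _generate_quick_start_curriculum(essential: List[Dict], recommended: List[Dict]) -> List[Dict]:
--     """Generate Quick Start curriculum (4 skills, 15 min)."""
--     curriculum = []
--
--     # First 3 essential skills
--     essential_subset = ["nav-start", "nav-marker", "nav-task"]
--     for skill in essential:
--         if skill["id"] in essential_subset:
--             curriculum.append({
--                 "skill": skill["id"],
--                 "estimated_time": "3 min",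
--                 "task_file": f"{len(curriculum) + 1:02d}-{skill['id']}.md",
--             })
--
--     # One dev skill if available
--     if recommended:
--         dev_skill = recommended[0]
--         curriculum.append({
--             "skill": dev_skill["id"],
--             "estimated_time": "5 min",
--             "task_file": f"{len(curriculum) + 1:02d}-{dev_skill['id']}.md",
--         })
--
--     return curriculum
-- ===== SOURCE B (Python) =====
-- from typing import Dict, List
--
-- def _generate_quick_start_curriculum(essential: List[Dict], recommended: List[Dict]) -> List[Dict]:
--     """Generate Quick Start curriculum (4 skills, 15 min)."""
--
--     def entry(sid, minutes, k):
--         return {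
--             "skill": sid,
--             "estimated_time": minutes,
--             "task_file": f"{k:02d}-{sid}.md",
--         }
--
--     def build(items, k):
--         # one structural recursion producing the curriculum front-to-back;
--         # the recommended dev skill is emitted in the base case
--         if not items:
--             return [entry(recommended[0]["id"], "5 min", k)] if recommended else []
--         sid = items[0]["id"]
--         if sid in ("nav-start", "nav-marker", "nav-task"):
--             return [entry(sid, "3 min", k)] + build(items[1:], k + 1)
--         return build(items[1:], k)
--
--     return build(essential, 1)
-- ===== Notes on version B (the rewrite author's own statement) =====
-- stated objective: alternative
-- what changed: B replaces A's iterative append-to-list loop with a running len()-based counter by a single structural recursion that conses entries front-to-back, threads the position counter explicitly, and emits the recommended dev skill in the recursion's base case.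
import Mathlib
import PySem

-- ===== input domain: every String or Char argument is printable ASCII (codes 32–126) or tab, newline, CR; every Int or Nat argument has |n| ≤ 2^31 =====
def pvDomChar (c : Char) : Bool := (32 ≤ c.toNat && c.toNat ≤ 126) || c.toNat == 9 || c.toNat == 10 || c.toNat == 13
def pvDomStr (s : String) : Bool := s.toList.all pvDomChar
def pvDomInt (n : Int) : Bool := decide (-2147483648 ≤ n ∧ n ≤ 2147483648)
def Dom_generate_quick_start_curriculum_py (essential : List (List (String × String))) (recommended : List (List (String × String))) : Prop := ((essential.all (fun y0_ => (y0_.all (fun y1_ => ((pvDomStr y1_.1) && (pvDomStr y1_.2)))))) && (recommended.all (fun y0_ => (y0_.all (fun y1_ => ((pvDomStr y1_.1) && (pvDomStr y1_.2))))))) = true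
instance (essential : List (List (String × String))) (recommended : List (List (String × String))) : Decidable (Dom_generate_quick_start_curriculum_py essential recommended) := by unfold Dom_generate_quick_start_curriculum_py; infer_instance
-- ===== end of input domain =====

-- B replaces A's append-to-list loop with a running len()-based counter by a single
-- structural recursion consing entries front-to-back with an explicit counter, emitting
-- the recommended dev skill in the base case.  Objective: alternative (same cost).

-- ===== PORT A =====

-- d["id"]: first match in the association list (Pre_ guarantees the key is present)
def pvGetId (d : List (String × String)) : String :=
  ((d.find? (fun p => p.1 == "id")).map Prod.snd).getD ""

-- f"{n:02d}" for 0 ≤ n (pads with one '0' below 10, otherwise plain decimal) — exact there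
def pvFmt2 (n : Nat) : String :=
  if n < 10 then "0" ++ PySem.Int.toStr (n : Int) else PySem.Int.toStr (n : Int)

def pvStepA (cur : List (List (String × String))) (skill : List (String × String)) :
    List (List (String × String)) :=
  let id := pvGetId skill
  if ["nav-start", "nav-marker", "nav-task"].contains id then
    cur ++ [[("skill", id), ("estimated_time", "3 min"),
             ("task_file", pvFmt2 (cur.length + 1) ++ "-" ++ id ++ ".md")]]
  else cur

def generate_quick_start_curriculum_py (essential : List (List (String × String))) (recommended : List (List (String × String))) : List (List (String × String)) :=
  let curriculum := essential.foldl pvStepA []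
  match recommended with
  | [] => curriculum
  | dev :: _ =>
    let id := pvGetId dev
    curriculum ++ [[("skill", id), ("estimated_time", "5 min"),
                    ("task_file", pvFmt2 (curriculum.length + 1) ++ "-" ++ id ++ ".md")]]

-- ===== PORT B =====

-- entry(sid, minutes, k)
def pvEntryB (sid minutes : String) (k : Nat) : List (String × String) :=
  [("skill", sid), ("estimated_time", minutes),
   ("task_file", pvFmt2 k ++ "-" ++ sid ++ ".md")]

-- build(items, k): one structural recursion; recommended handled in the base case
def pvBuildB (recommended : List (List (String × String))) :
    List (List (String × String)) → Nat → List (List (String × String))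
  | [], k =>
      match recommended with
      | [] => []
      | dev :: _ => [pvEntryB (pvGetId dev) "5 min" k]
  | s :: rest, k =>
      let sid := pvGetId s
      if ["nav-start", "nav-marker", "nav-task"].contains sid then
        pvEntryB sid "3 min" k :: pvBuildB recommended rest (k + 1)
      else
        pvBuildB recommended rest k

def generate_quick_start_curriculum_py_alt (essential : List (List (String × String))) (recommended : List (List (String × String))) : List (List (String × String)) :=
  pvBuildB recommended essential 1

-- ===== PRECONDITION & SPEC =====
-- Pre_ excludes exactly the inputs where Python A raises KeyError: a dict in `essential`,
-- or the first dict of a non-empty `recommended`, lacking the key "id".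
def Pre_generate_quick_start_curriculum_py (essential : List (List (String × String))) (recommended : List (List (String × String))) : Prop :=
  (essential.all (fun d => (d.find? (fun p => p.1 == "id")).isSome)
    && (recommended.take 1).all (fun d => (d.find? (fun p => p.1 == "id")).isSome)) = true
instance (essential : List (List (String × String))) (recommended : List (List (String × String))) : Decidable (Pre_generate_quick_start_curriculum_py essential recommended) := by unfold Pre_generate_quick_start_curriculum_py; infer_instance

def pvWitness_generate_quick_start_curriculum_py : (List (List (String × String))) × (List (List (String × String))) :=
  ([[("id", "nav-start")], [("id", "other")]], [[("id", "dev-setup")]])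

def Spec_generate_quick_start_curriculum_py (essential : List (List (String × String))) (recommended : List (List (String × String))) (out : List (List (String × String))) : Prop := out = generate_quick_start_curriculum_py_alt essential recommended
instance (essential : List (List (String × String))) (recommended : List (List (String × String))) (out : List (List (String × String))) : Decidable (Spec_generate_quick_start_curriculum_py essential recommended out) := by unfold Spec_generate_quick_start_curriculum_py; infer_instance

-- ===== CLAIM (what is proved, stated in full; the proofs are below) =====
def Claim_equal_generate_quick_start_curriculum_py : Prop := ∀ (essential : List (List (String × String))) (recommended : List (List (String × String))), Dom_generate_quick_start_curriculum_py essential recommended → Pre_generate_quick_start_curriculum_py essential recommended → Spec_generate_quick_start_curriculum_py essential recommended (generate_quick_start_curriculum_py essential recommended)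

-- ===== LEMMAS AND PROOFS =====

-- A's post-loop recommended step, as a function of the loop's result
def pvPostA (recommended : List (List (String × String))) (cur : List (List (String × String))) :
    List (List (String × String)) :=
  match recommended with
  | [] => cur
  | dev :: _ => cur ++ [pvEntryB (pvGetId dev) "5 min" (cur.length + 1)]

lemma pvFold_build (recommended : List (List (String × String)))
    (essential : List (List (String × String))) :
    ∀ cur, pvPostA recommended (essential.foldl pvStepA cur)
      = cur ++ pvBuildB recommended essential (cur.length + 1) := by
  induction essential with
  | nil =>
    intro cur
    cases recommended with
    | nil => simp [pvPostA, pvBuildB]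
    | cons dev rest => simp [pvPostA, pvBuildB]
  | cons s rest ih =>
    intro cur
    by_cases h : (["nav-start", "nav-marker", "nav-task"].contains (pvGetId s)) = true
    · have hstep : pvStepA cur s = cur ++ [pvEntryB (pvGetId s) "3 min" (cur.length + 1)] := by
        simp only [pvStepA, pvEntryB]; rw [if_pos h]
      have hb : pvBuildB recommended (s :: rest) (cur.length + 1)
          = pvEntryB (pvGetId s) "3 min" (cur.length + 1)
            :: pvBuildB recommended rest (cur.length + 2) := by
        simp only [pvBuildB]; rw [if_pos h]
      simp only [List.foldl_cons, hstep, hb, ih]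
      simp [List.append_assoc]
    · have hstep : pvStepA cur s = cur := by
        simp only [pvStepA]; rw [if_neg h]
      have hb : pvBuildB recommended (s :: rest) (cur.length + 1)
          = pvBuildB recommended rest (cur.length + 1) := by
        simp only [pvBuildB]; rw [if_neg h]
      simp only [List.foldl_cons, hstep, hb, ih]

-- ===== VERDICT (by name: the statement is the Claim_ definition above) =====
theorem generate_quick_start_curriculum_py_spec : Claim_equal_generate_quick_start_curriculum_py := by
  intro essential recommended _ _
  unfold Spec_generate_quick_start_curriculum_py
  have h := pvFold_build recommended essential []
  unfold generate_quick_start_curriculum_py generate_quick_start_curriculum_py_alt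
  cases recommended with
  | nil => simpa [pvPostA] using h
  | cons dev rest => simpa [pvPostA, pvEntryB] using h
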